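-- pv_equiv track=rewrite | github.com/Ignotus/advent-of-code2025 | day8/main.py | find_last_merge
-- ===== SOURCE A (Python) =====
-- def merge_groups(groups: dict[int, int], i: int, j: int):
--     group_id_j = groups[j]
--     for k, v in groups.items():
--         if v == group_id_j:
--             groups[k] = groups[i]
--
-- def find_last_merge(connections: list[tuple[int, tuple[int, int]]], n_boxes: int) -> tuple[int, int]:
--     groups = {i : i for i in range(n_boxes)}
--     remaining_groups = set(groups.values())
--     for _, (i, j) in connections:
--         if groups[i] != groups[j]:
--             if len(remaining_groups) == 2:
--                 return (i, j)
--
--             remaining_groups.remove(groups[j])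
--             merge_groups(groups, i, j)
-- ===== SOURCE B (Python) =====
-- def find_last_merge(connections, n_boxes):
--     # Component-indexed merge: relabel only the members of j's component
--     # (via a label -> members index) instead of scanning all n_boxes each merge.
--     label = list(range(n_boxes))
--     members = {i: [i] for i in range(n_boxes)}
--     count = n_boxes
--     for _, (i, j) in connections:
--         li, lj = label[i], label[j]
--         if li != lj:
--             if count == 2:
--                 return (i, j)
--             moved = members.pop(lj)
--             for x in moved:
--                 label[x] = li
--             members[li].extend(moved)
--             count -= 1
-- ===== Notes on version B (the rewrite author's own statement) =====
-- stated objective: faster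
-- what changed: B replaces A's per-merge full scan of all n_boxes entries (plus a remaining-label set) with a label->members index so each merge relabels only the members of the absorbed component and merges the member lists, tracking the component count as an integer.
-- outside the precondition, e.g. on find_last_merge([(0, (0, 1)), (0, (2, 99))], 2): A returns (0, 1), B returns (0, 1); on find_last_merge([(0, (0, 5))], 3): A raises KeyError, B raises IndexError
import Mathlib
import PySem

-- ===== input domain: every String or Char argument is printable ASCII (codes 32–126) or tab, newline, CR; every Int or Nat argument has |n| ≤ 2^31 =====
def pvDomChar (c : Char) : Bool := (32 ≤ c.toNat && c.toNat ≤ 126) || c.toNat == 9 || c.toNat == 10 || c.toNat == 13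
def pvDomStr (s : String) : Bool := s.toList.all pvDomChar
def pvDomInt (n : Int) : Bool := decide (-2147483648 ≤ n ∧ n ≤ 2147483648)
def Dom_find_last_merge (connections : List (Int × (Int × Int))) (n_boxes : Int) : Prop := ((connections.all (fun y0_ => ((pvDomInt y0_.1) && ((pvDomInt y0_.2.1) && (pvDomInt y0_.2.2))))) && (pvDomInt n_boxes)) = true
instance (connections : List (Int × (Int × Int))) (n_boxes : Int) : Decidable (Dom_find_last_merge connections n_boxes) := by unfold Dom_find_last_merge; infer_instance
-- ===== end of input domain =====

-- B replaces A's per-merge scan of all n_boxes dict entries with a label→members index that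
-- relabels only the absorbed component, tracking the component count as an integer (see timing run).

-- ===== PORT A =====
-- merge_groups: reads group_id_j = groups[j], then iterates the live dict, re-reading groups[k]
-- and groups[i] fresh each step (only values at existing keys change, so the key list is a
-- faithful snapshot of Python's items() iteration).
def merge_groups (groups : PySem.Dict Int Int) (i j : Int) : PySem.Dict Int Int :=
  match groups.get? j with
  | none => groups   -- Python: KeyError; unreachable (the caller has already read groups[j])
  | some gj =>
      groups.keys.foldl (fun d k => if d.getD k 0 == gj then d.insert k (d.getD i 0) else d) groups

def pvFindLoop : List (Int × (Int × Int)) → PySem.Dict Int Int → PySem.Set Int → Option (Int × Int)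
  | [], _, _ => none
  | (_, (i, j)) :: rest, groups, remaining =>
    match groups.get? i, groups.get? j with
    | some gi, some gj =>
      if gi ≠ gj then
        if PySem.Set.len remaining = 2 then some (i, j)
        else
          match PySem.Set.remove? remaining gj with
          | some remaining' => pvFindLoop rest (merge_groups groups i j) remaining'
          | none => none   -- Python: KeyError; unreachable (gj is a value of groups)
      else pvFindLoop rest groups remaining
    | _, _ => none         -- Python: KeyError (i or j is not a box id); excluded by Pre_

def find_last_merge (connections : List (Int × (Int × Int))) (n_boxes : Int) : Option (Int × Int) :=
  let groups := (PySem.List.pyRange 0 n_boxes).foldl (fun d i => d.insert i i) PySem.Dict.empty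
  let remaining := PySem.Set.ofList (PySem.Dict.values groups)
  pvFindLoop connections groups remaining

-- ===== PORT B =====
-- label[x] = v with a Python (possibly negative) index; none = IndexError, unreachable in B's
-- loop because every x comes from the members index.
def pySetList (xs : List Int) (idx v : Int) : List Int :=
  match PySem.List.pyIdx? xs.length idx with
  | some k => xs.set k v
  | none => xs

def pvAltLoop : List (Int × (Int × Int)) → List Int → PySem.Dict Int (List Int) → Int → Option (Int × Int)
  | [], _, _, _ => none
  | (_, (i, j)) :: rest, label, members, count =>
    match PySem.List.pyGet? label i, PySem.List.pyGet? label j with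
    | some li, some lj =>
      if li ≠ lj then
        if count = 2 then some (i, j)
        else
          match members.pop? lj with
          | some (moved, members') =>
              pvAltLoop rest (moved.foldl (fun ls x => pySetList ls x li) label)
                (members'.modify li [] (· ++ moved)) (count - 1)
          | none => none   -- Python: KeyError; unreachable (lj is a label with members)
      else pvAltLoop rest label members count
    | _, _ => none         -- Python: IndexError; excluded by Pre_

def find_last_merge_alt (connections : List (Int × (Int × Int))) (n_boxes : Int) : Option (Int × Int) :=
  let label := PySem.List.pyRange 0 n_boxes
  let members := (PySem.List.pyRange 0 n_boxes).foldl (fun d i => d.insert i [i]) PySem.Dict.empty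
  pvAltLoop connections label members n_boxes

-- ===== PRECONDITION & SPEC =====
-- Pre_ excludes connections naming a box id outside range(n_boxes): on the first such id A's
-- dict lookup raises KeyError (unless A has already returned before reaching it).
def Pre_find_last_merge (connections : List (Int × (Int × Int))) (n_boxes : Int) : Prop :=
  ∀ c ∈ connections, 0 ≤ c.2.1 ∧ c.2.1 < n_boxes ∧ 0 ≤ c.2.2 ∧ c.2.2 < n_boxes
instance (connections : List (Int × (Int × Int))) (n_boxes : Int) : Decidable (Pre_find_last_merge connections n_boxes) := by unfold Pre_find_last_merge; infer_instance

def pvWitness_find_last_merge : (List (Int × (Int × Int))) × Int := ([(0, (0, 1)), (1, (1, 2)), (2, (0, 2))], 3)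

def Spec_find_last_merge (connections : List (Int × (Int × Int))) (n_boxes : Int) (out : Option (Int × Int)) : Prop := out = find_last_merge_alt connections n_boxes
instance (connections : List (Int × (Int × Int))) (n_boxes : Int) (out : Option (Int × Int)) : Decidable (Spec_find_last_merge connections n_boxes out) := by unfold Spec_find_last_merge; infer_instance

-- ===== CLAIM (what is proved, stated in full; the proofs are below) =====
def Claim_equal_find_last_merge : Prop := ∀ (connections : List (Int × (Int × Int))) (n_boxes : Int), Dom_find_last_merge connections n_boxes → Pre_find_last_merge connections n_boxes → Spec_find_last_merge connections n_boxes (find_last_merge connections n_boxes)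

-- ===== LEMMAS AND PROOFS =====

-- The simulation invariant between A's state (groups, remaining) and B's state (label, members, count).
def pvInv (n : ℕ) (groups : PySem.Dict Int Int) (remaining : PySem.Set Int)
    (label : List Int) (members : PySem.Dict Int (List Int)) (count : Int) : Prop :=
  label.length = n ∧
  groups.items = (List.range n).map (fun k : ℕ => ((k : Int), label.getD k 0)) ∧
  remaining.Nodup ∧
  (∀ v : Int, v ∈ remaining ↔ ∃ k : ℕ, k < n ∧ label.getD k 0 = v) ∧
  count = (remaining.length : Int) ∧
  members.keys.Nodup ∧
  (∀ l x : Int, x ∈ members.getD l [] ↔ ∃ k : ℕ, k < n ∧ x = (k : Int) ∧ label.getD k 0 = l)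

theorem pvGet?_erase {κ ν : Type} [BEq κ] [LawfulBEq κ] [DecidableEq κ] (d : PySem.Dict κ ν) (k k' : κ) :
    (d.erase k).get? k' = if k' = k then none else d.get? k' := by
  obtain ⟨l⟩ := d
  simp only [PySem.Dict.erase, PySem.Dict.get?]
  by_cases hkk : k' = k
  · subst hkk
    rw [if_pos rfl, List.find?_eq_none.mpr]
    · rfl
    · intro p hp hbeq
      have := List.of_mem_filter hp
      simp at this hbeq
      exact this hbeq
  · simp only [if_neg hkk]
    induction l with
    | nil => rfl
    | cons p t ih =>
      rw [List.filter_cons]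
      cases hb : (p.1 == k) with
      | true =>
        have h1 : (p.1 == k') = false := by
          simp at hb ⊢; exact fun h => hkk (by rw [← h, hb])
        simp only [Bool.not_true, Bool.false_eq_true, if_false, List.find?_cons, h1]
        exact ih
      | false =>
        simp only [Bool.not_false, if_true, List.find?_cons]
        cases hb' : (p.1 == k') with
        | true => rfl
        | false => exact ih

theorem pvFilter_ne_of_not_mem {α : Type} [BEq α] [LawfulBEq α] (xs : List α) (x : α)
    (h : x ∉ xs) : xs.filter (fun y => !(y == x)) = xs := by
  induction xs with
  | nil => rfl
  | cons a t ih =>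
    simp only [List.mem_cons, not_or] at h
    have hax : ¬ a = x := fun e => h.1 e.symm
    simp [hax, ih h.2]

theorem pvLength_discard {α : Type} [BEq α] [LawfulBEq α] (s : PySem.Set α) (x : α)
    (hnd : s.Nodup) (hx : x ∈ s) : (PySem.Set.discard s x).length + 1 = s.length := by
  induction s with
  | nil => cases hx
  | cons a t ih =>
    rcases List.mem_cons.mp hx with h | h
    · subst h
      have hnmem : x ∉ t := (List.nodup_cons.mp hnd).1
      simp [PySem.Set.discard, pvFilter_ne_of_not_mem t x hnmem]
    · have ha : a ≠ x := fun e => (List.nodup_cons.mp hnd).1 (e ▸ h)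
      have := ih (List.nodup_cons.mp hnd).2 h
      simp only [PySem.Set.discard, List.filter_cons] at this ⊢
      simp [ha, this]

theorem pvSet_ofList_of_nodup {α : Type} [BEq α] [LawfulBEq α] (xs : List α) (h : xs.Nodup) :
    PySem.Set.ofList xs = xs := by
  have aux : ∀ (ys s : List α), (s ++ ys).Nodup → ys.foldl PySem.Set.add s = s ++ ys := by
    intro ys
    induction ys with
    | nil => simp
    | cons a t ih =>
      intro s hs
      have ha : a ∉ s := by
        have := List.disjoint_of_nodup_append hs
        exact fun hmem => this hmem (List.mem_cons_self ..)
      rw [List.foldl_cons, PySem.Set.add_of_not_mem ha, ih]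
      · simp
      · simpa using hs
  simpa using aux xs [] (by simpa using h)

-- A's merge loop, characterised on the items list.
theorem pvMergeFold (iInt gi gj : Int) (hne : gi ≠ gj) :
    ∀ (ks : List Int) (d : PySem.Dict Int Int), d.keys.Nodup →
      (∀ k ∈ ks, d.contains k = true) → d.getD iInt 0 = gi →
      (ks.foldl (fun d k => if d.getD k 0 == gj then d.insert k (d.getD iInt 0) else d) d).items
        = d.items.map (fun p => if p.1 ∈ ks ∧ p.2 = gj then (p.1, gi) else p) := by
  intro ks
  induction ks with
  | nil => intro d _ _ _; simp
  | cons k t ih =>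
    intro d hnd hc hi
    rw [List.foldl_cons]
    have hval : ∀ p ∈ d.items, d.getD p.1 0 = p.2 := by
      intro p hp
      exact PySem.Dict.getD_of_mem_items _ (by simpa using hp) hnd 0
    by_cases hkv : d.getD k 0 = gj
    · have hstep : (if d.getD k 0 == gj then d.insert k (d.getD iInt 0) else d)
          = d.insert k gi := by rw [hi]; simp [hkv]
      rw [hstep]
      have hck : d.contains k = true := hc k (List.mem_cons_self ..)
      have hkeys : (d.insert k gi).keys = d.keys := PySem.Dict.keys_insert_of_contains d gi hck
      have hik : iInt ≠ k := by
        intro e; rw [e] at hi; rw [hi] at hkv; exact hne hkv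
      rw [ih (d.insert k gi) (hkeys ▸ hnd)
        (by intro k' h
            rw [PySem.Dict.contains_insert]
            simp [hc k' (List.mem_cons_of_mem _ h)])
        (by rw [PySem.Dict.getD_insert]; simp [hik, hi])]
      rw [PySem.Dict.items_insert_of_contains d gi hck, List.map_map]
      apply List.map_congr_left
      intro p hp
      by_cases hpk : p.1 = k
      · have hp2 : p.2 = gj := by rw [← hval p hp, hpk, hkv]
        simp [Function.comp, hpk, hp2, hne]
      · simp [Function.comp, hpk, List.mem_cons]
    · have hstep : (if d.getD k 0 == gj then d.insert k (d.getD iInt 0) else d) = d := by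
        simp [hkv]
      rw [hstep, ih d hnd (fun k' h => hc k' (List.mem_cons_of_mem _ h)) hi]
      apply List.map_congr_left
      intro p hp
      by_cases hpk : p.1 = k
      · have hp2 : p.2 ≠ gj := by rw [← hval p hp, hpk]; exact hkv
        simp [hpk, hp2, List.mem_cons]
      · simp [hpk, List.mem_cons]

-- B's relabel loop, characterised pointwise.
theorem pvLength_pySetList (xs : List Int) (idx v : Int) :
    (pySetList xs idx v).length = xs.length := by
  unfold pySetList
  cases h : PySem.List.pyIdx? xs.length idx <;> simp

theorem pvLength_foldl_pySet (mv : List Int) (label : List Int) (li : Int) :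
    (mv.foldl (fun ls x => pySetList ls x li) label).length = label.length := by
  induction mv generalizing label with
  | nil => rfl
  | cons x t ih => rw [List.foldl_cons, ih, pvLength_pySetList]

theorem pvGetD_foldl_pySet (mv : List Int) (label : List Int) (li : Int)
    (hmv : ∀ x ∈ mv, 0 ≤ x ∧ x < (label.length : Int)) (k : ℕ) (hk : k < label.length) :
    (mv.foldl (fun ls x => pySetList ls x li) label).getD k 0
      = if (k : Int) ∈ mv then li else label.getD k 0 := by
  induction mv generalizing label with
  | nil => simp
  | cons x t ih =>
    have hx := hmv x (List.mem_cons_self ..)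
    have hset : pySetList label x li = label.set x.toNat li := by
      unfold pySetList
      simp only [PySem.List.pyIdx?, if_pos hx.1, if_pos hx.2]
    rw [List.foldl_cons, hset]
    have hlen : (label.set x.toNat li).length = label.length := by simp
    rw [ih (label.set x.toNat li)
      (by intro y hy; have := hmv y (List.mem_cons_of_mem _ hy); omega)
      (by omega)]
    have hgd : (label.set x.toNat li).getD k 0 = if k = x.toNat then li else label.getD k 0 := by
      rw [List.getD_eq_getElem?_getD, List.getD_eq_getElem?_getD, List.getElem?_set]
      by_cases hkx : x.toNat = k
      · simp [hkx, hk]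
      · have hkx' : ¬ k = x.toNat := fun h => hkx h.symm
        simp [hkx, hkx']
    rw [hgd]
    simp only [List.mem_cons]
    by_cases hmem : (k : Int) ∈ t
    · rw [if_pos hmem, if_pos (Or.inr hmem)]
    · rw [if_neg hmem]
      by_cases hke : k = x.toNat
      · rw [if_pos hke, if_pos (Or.inl (by omega))]
      · rw [if_neg hke, if_neg (by push Not; exact ⟨by omega, hmem⟩)]

theorem pvLoopEq (n : ℕ) :
    ∀ (conns : List (Int × (Int × Int))) (groups : PySem.Dict Int Int)
      (remaining : PySem.Set Int) (label : List Int) (members : PySem.Dict Int (List Int)) (count : Int),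
      (∀ c ∈ conns, 0 ≤ c.2.1 ∧ c.2.1 < (n : Int) ∧ 0 ≤ c.2.2 ∧ c.2.2 < (n : Int)) →
      pvInv n groups remaining label members count →
      pvFindLoop conns groups remaining = pvAltLoop conns label members count := by
  intro conns
  induction conns with
  | nil => intro _ _ _ _ _ _ _; rfl
  | cons hd rest ih =>
    intro groups remaining label members count hpre hinv
    obtain ⟨hlen, hitems, hndrem, hmemrem, hcount, hndk, hmem⟩ := hinv
    obtain ⟨w, i, j⟩ := hd
    have hb := hpre (w, (i, j)) (List.mem_cons_self ..)
    have hi0 : 0 ≤ i := hb.1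
    have hin : i < (n : Int) := hb.2.1
    have hj0 : 0 ≤ j := hb.2.2.1
    have hjn : j < (n : Int) := hb.2.2.2
    have hkeys : groups.keys = (List.range n).map (fun k : ℕ => (k : Int)) := by
      rw [PySem.Dict.keys, hitems, List.map_map]; rfl
    have hndkeys : groups.keys.Nodup := by
      rw [hkeys]; exact List.nodup_range.map (fun a b h => by omega)
    have hgets : ∀ k : ℕ, k < n → groups.get? (k : Int) = some (label.getD k 0) := by
      intro k hk
      apply PySem.Dict.get?_of_mem_items _ _ hndkeys
      rw [hitems]; exact List.mem_map.mpr ⟨k, List.mem_range.mpr hk, rfl⟩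
    have hgeti : groups.get? i = some (label.getD i.toNat 0) := by
      have := hgets i.toNat (by omega); rwa [Int.toNat_of_nonneg hi0] at this
    have hgetj : groups.get? j = some (label.getD j.toNat 0) := by
      have := hgets j.toNat (by omega); rwa [Int.toNat_of_nonneg hj0] at this
    have hpyget : ∀ z : Int, 0 ≤ z → z < (n : Int) →
        PySem.List.pyGet? label z = some (label.getD z.toNat 0) := by
      intro z h0 h1
      have hz : z.toNat < label.length := by omega
      simp only [PySem.List.pyGet?, PySem.List.pyIdx?]
      rw [if_pos h0, if_pos (by omega : z < (label.length : Int))]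
      simp only [Option.bind_some]
      rw [List.getElem?_eq_getElem hz, List.getD_eq_getElem _ _ hz]
    have hpyi := hpyget i hi0 hin
    have hpyj := hpyget j hj0 hjn
    simp only [pvFindLoop, pvAltLoop, hgeti, hgetj, hpyi, hpyj]
    by_cases heq : label.getD i.toNat 0 = label.getD j.toNat 0
    · rw [if_neg (not_not_intro heq), if_neg (not_not_intro heq)]
      exact ih groups remaining label members count
        (fun c hc => hpre c (List.mem_cons_of_mem _ hc))
        ⟨hlen, hitems, hndrem, hmemrem, hcount, hndk, hmem⟩
    · rw [if_pos heq, if_pos heq]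
      by_cases h2 : count = 2
      · rw [if_pos h2, if_pos (by simp only [PySem.Set.len]; omega)]
      · rw [if_neg h2, if_neg (by simp only [PySem.Set.len]; omega)]
        -- abbreviations
        have hljrem : label.getD j.toNat 0 ∈ remaining :=
          (hmemrem _).mpr ⟨j.toNat, by omega, rfl⟩
        have hcontrem : remaining.contains (label.getD j.toNat 0) = true :=
          (PySem.Set.contains_iff _ _).mpr hljrem
        have hjmem : (j : Int) ∈ members.getD (label.getD j.toNat 0) [] := by
          rw [hmem]
          exact ⟨j.toNat, by omega, (Int.toNat_of_nonneg hj0).symm, rfl⟩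
        obtain ⟨mv, hg⟩ : ∃ mv, members.get? (label.getD j.toNat 0) = some mv := by
          cases hgc : members.get? (label.getD j.toNat 0) with
          | none =>
            rw [PySem.Dict.getD_eq_get?_getD, hgc] at hjmem
            cases hjmem
          | some mv => exact ⟨mv, rfl⟩
        have hmvchar : ∀ x : Int, x ∈ mv ↔ ∃ k : ℕ, k < n ∧ x = (k : Int) ∧ label.getD k 0 = label.getD j.toNat 0 := by
          intro x
          have := hmem (label.getD j.toNat 0) x
          rwa [PySem.Dict.getD_eq_get?_getD, hg, Option.getD_some] at this
        have hmvbounds : ∀ x ∈ mv, 0 ≤ x ∧ x < (label.length : Int) := by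
          intro x hx
          obtain ⟨k, hk, rfl, _⟩ := (hmvchar x).mp hx
          constructor <;> omega
        have hlabNewlen : (mv.foldl (fun ls x => pySetList ls x (label.getD i.toNat 0)) label).length = n := by
          rw [pvLength_foldl_pySet]; exact hlen
        have hlabNew : ∀ k : ℕ, k < n →
            (mv.foldl (fun ls x => pySetList ls x (label.getD i.toNat 0)) label).getD k 0
              = if label.getD k 0 = label.getD j.toNat 0 then label.getD i.toNat 0 else label.getD k 0 := by
          intro k hk
          rw [pvGetD_foldl_pySet mv label _ hmvbounds k (by omega)]
          have hiff : ((k : Int) ∈ mv) ↔ label.getD k 0 = label.getD j.toNat 0 := by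
            rw [hmvchar]
            constructor
            · rintro ⟨k', hk', hkk', hl⟩
              have : k = k' := by omega
              rwa [this]
            · intro h; exact ⟨k, hk, rfl, h⟩
          by_cases hlk : label.getD k 0 = label.getD j.toNat 0
          · rw [if_pos (hiff.mpr hlk), if_pos hlk]
          · rw [if_neg (fun hm => hlk (hiff.mp hm)), if_neg hlk]
        -- members.erase keys are nodup
        have herasekeys : (members.erase (label.getD j.toNat 0)).keys.Nodup := by
          have hsub : (members.erase (label.getD j.toNat 0)).keys.Sublist members.keys := by
            simp only [PySem.Dict.erase, PySem.Dict.keys]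
            exact List.filter_sublist.map _
          exact hndk.sublist hsub
        have hgdNew : ∀ l : Int,
            (((members.erase (label.getD j.toNat 0)).modify (label.getD i.toNat 0) [] (· ++ mv))).getD l []
              = if l = label.getD i.toNat 0 then members.getD (label.getD i.toNat 0) [] ++ mv
                else if l = label.getD j.toNat 0 then [] else members.getD l [] := by
          intro l
          simp only [PySem.Dict.modify]
          rw [PySem.Dict.getD_insert]
          by_cases hl1 : l = label.getD i.toNat 0
          · rw [if_pos hl1, if_pos hl1]
            congr 1
            rw [PySem.Dict.getD_eq_get?_getD, pvGet?_erase, if_neg heq, ← PySem.Dict.getD_eq_get?_getD]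
          · rw [if_neg hl1, if_neg hl1, PySem.Dict.getD_eq_get?_getD, pvGet?_erase]
            by_cases hl2 : l = label.getD j.toNat 0
            · rw [if_pos hl2, if_pos hl2]
              rfl
            · rw [if_neg hl2, if_neg hl2, ← PySem.Dict.getD_eq_get?_getD]
        rw [PySem.Dict.pop?, hg, Option.map_some]
        simp only [PySem.Set.remove?, hcontrem, if_pos]
        apply ih
        · exact fun c hc => hpre c (List.mem_cons_of_mem _ hc)
        refine ⟨hlabNewlen, ?_, PySem.Set.nodup_discard _ _ hndrem, ?_, ?_, ?_, ?_⟩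
        · -- items of merge_groups
          simp only [merge_groups, hgetj]
          have hgdi : groups.getD i 0 = label.getD i.toNat 0 := by
            rw [PySem.Dict.getD_eq_get?_getD, hgeti, Option.getD_some]
          have hmf := pvMergeFold i (label.getD i.toNat 0) (label.getD j.toNat 0) heq
            groups.keys groups hndkeys
            (fun k hk => (PySem.Dict.contains_iff_mem_keys groups k).mpr hk) hgdi
          rw [hmf, hitems, List.map_map]
          refine List.map_congr_left (fun k hk => ?_)
          have hkn := List.mem_range.mp hk
          have hkmem : ((k : Int)) ∈ groups.keys := by
            rw [hkeys]; exact List.mem_map.mpr ⟨k, hk, rfl⟩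
          simp only [Function.comp_apply]
          rw [hlabNew k hkn]
          by_cases hlk : label.getD k 0 = label.getD j.toNat 0
          · rw [if_pos ⟨hkmem, hlk⟩, if_pos hlk]
          · rw [if_neg (fun h => hlk h.2), if_neg hlk]
        · -- remaining membership
          intro v
          rw [PySem.Set.mem_discard, hmemrem]
          constructor
          · rintro ⟨⟨k, hk, hkv⟩, hvne⟩
            refine ⟨k, hk, ?_⟩
            rw [hlabNew k hk, if_neg (by rw [hkv]; exact hvne), hkv]
          · rintro ⟨k, hk, hkv⟩
            rw [hlabNew k hk] at hkv
            by_cases hlk : label.getD k 0 = label.getD j.toNat 0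
            · rw [if_pos hlk] at hkv
              exact ⟨⟨i.toNat, by omega, hkv⟩, by rw [← hkv]; exact heq⟩
            · rw [if_neg hlk] at hkv
              exact ⟨⟨k, hk, hkv⟩, by rw [← hkv]; exact hlk⟩
        · -- count
          have := pvLength_discard remaining (label.getD j.toNat 0) hndrem hljrem
          omega
        · -- keys nodup
          simp only [PySem.Dict.modify]
          exact PySem.Dict.nodup_keys_insert _ _ _ herasekeys
        · -- members membership
          intro l x
          rw [hgdNew l]
          by_cases hl1 : l = label.getD i.toNat 0
          · subst hl1
            rw [if_pos rfl, List.mem_append, hmem, hmvchar]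
            constructor
            · rintro (⟨k, hk, hx, hl⟩ | ⟨k, hk, hx, hl⟩)
              · refine ⟨k, hk, hx, ?_⟩
                rw [hlabNew k hk, if_neg (by rw [hl]; exact heq), hl]
              · refine ⟨k, hk, hx, ?_⟩
                rw [hlabNew k hk, if_pos hl]
            · rintro ⟨k, hk, hx, hl⟩
              rw [hlabNew k hk] at hl
              by_cases hlk : label.getD k 0 = label.getD j.toNat 0
              · exact Or.inr ⟨k, hk, hx, hlk⟩
              · rw [if_neg hlk] at hl
                exact Or.inl ⟨k, hk, hx, hl⟩
          · rw [if_neg hl1]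
            by_cases hl2 : l = label.getD j.toNat 0
            · rw [if_pos hl2]
              simp only [List.not_mem_nil, false_iff]
              rintro ⟨k, hk, hx, hl⟩
              rw [hlabNew k hk] at hl
              by_cases hlk : label.getD k 0 = label.getD j.toNat 0
              · rw [if_pos hlk] at hl
                exact heq (hl.trans hl2)
              · rw [if_neg hlk] at hl
                exact hlk (hl.trans hl2)
            · rw [if_neg hl2, hmem]
              constructor
              · rintro ⟨k, hk, hx, hl⟩
                refine ⟨k, hk, hx, ?_⟩
                rw [hlabNew k hk, if_neg (fun h => hl2 (hl.symm.trans h)), hl]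
              · rintro ⟨k, hk, hx, hl⟩
                rw [hlabNew k hk] at hl
                by_cases hlk : label.getD k 0 = label.getD j.toNat 0
                · rw [if_pos hlk] at hl
                  exact absurd hl.symm hl1
                · rw [if_neg hlk] at hl
                  exact ⟨k, hk, hx, hl⟩

theorem pvInvInit (n : ℕ) :
    pvInv n
      ((PySem.List.pyRange 0 (n : Int)).foldl (fun d i => d.insert i i) PySem.Dict.empty)
      (PySem.Set.ofList (PySem.Dict.values ((PySem.List.pyRange 0 (n : Int)).foldl (fun d i => d.insert i i) PySem.Dict.empty)))
      (PySem.List.pyRange 0 (n : Int))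
      ((PySem.List.pyRange 0 (n : Int)).foldl (fun d i => d.insert i [i]) PySem.Dict.empty)
      (n : Int) := by
  have hL : PySem.List.pyRange 0 (n : Int) = (List.range n).map (fun k : ℕ => (k : Int)) :=
    PySem.List.pyRange_zero_natCast n
  have hLnd : (PySem.List.pyRange 0 (n : Int)).Nodup := by
    rw [hL]
    exact List.nodup_range.map (fun a b h => by omega)
  have hfresh : ∀ a ∈ PySem.List.pyRange 0 (n : Int),
      (PySem.Dict.empty : PySem.Dict Int Int).contains a = false := by
    intro a _; exact PySem.Dict.contains_empty a
  have hfresh2 : ∀ a ∈ PySem.List.pyRange 0 (n : Int),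
      (PySem.Dict.empty : PySem.Dict Int (List Int)).contains a = false := by
    intro a _; exact PySem.Dict.contains_empty a
  have hmapid : (List.map (fun a : Int => a) (PySem.List.pyRange 0 (n : Int))).Nodup := by
    simpa using hLnd
  have hitems : ((PySem.List.pyRange 0 (n : Int)).foldl (fun d i => d.insert i i) PySem.Dict.empty).items
      = (PySem.List.pyRange 0 (n : Int)).map (fun a => (a, a)) := by
    simpa using PySem.Dict.items_foldl_insert_fresh (PySem.List.pyRange 0 (n : Int))
      (fun a => a) (fun a => a) PySem.Dict.empty hfresh hmapid
  have hitems2 : ((PySem.List.pyRange 0 (n : Int)).foldl (fun d i => d.insert i [i]) PySem.Dict.empty).items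
      = (PySem.List.pyRange 0 (n : Int)).map (fun a => (a, [a])) := by
    simpa using PySem.Dict.items_foldl_insert_fresh (PySem.List.pyRange 0 (n : Int))
      (fun a => a) (fun a => [a]) PySem.Dict.empty hfresh2 hmapid
  have hlen : (PySem.List.pyRange 0 (n : Int)).length = n := by simp [hL]
  have hgL : ∀ k : ℕ, k < n → (PySem.List.pyRange 0 (n : Int)).getD k 0 = (k : Int) := by
    intro k hk
    rw [hL]
    exact PySem.List.getD_map_range (fun k : ℕ => (k : Int)) n k 0 hk
  have hvals : PySem.Dict.values ((PySem.List.pyRange 0 (n : Int)).foldl (fun d i => d.insert i i) PySem.Dict.empty)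
      = (List.range n).map (fun k : ℕ => (k : Int)) := by
    rw [PySem.Dict.values, hitems, hL, List.map_map, List.map_map]
    rfl
  have hkeys2nd : ((PySem.List.pyRange 0 (n : Int)).foldl (fun d i => d.insert i [i]) PySem.Dict.empty).keys.Nodup := by
    rw [PySem.Dict.keys, hitems2, List.map_map]
    exact hmapid
  have hmemitems2 : ∀ k : ℕ, k < n →
      ((k : Int), [(k : Int)]) ∈ ((PySem.List.pyRange 0 (n : Int)).foldl (fun d i => d.insert i [i]) PySem.Dict.empty).items := by
    intro k hk
    rw [hitems2, hL]
    exact List.mem_map.mpr ⟨(k : Int), List.mem_map.mpr ⟨k, List.mem_range.mpr hk, rfl⟩, rfl⟩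
  have hget2 : ∀ k : ℕ, k < n →
      ((PySem.List.pyRange 0 (n : Int)).foldl (fun d i => d.insert i [i]) PySem.Dict.empty).get? (k : Int) = some [(k : Int)] :=
    fun k hk => PySem.Dict.get?_of_mem_items _ (hmemitems2 k hk) hkeys2nd
  refine ⟨hlen, ?_, ?_, ?_, ?_, hkeys2nd, ?_⟩
  · rw [hitems, hL, List.map_map]
    refine List.map_congr_left (fun k hk => ?_)
    have := PySem.List.getD_map_range (fun k : ℕ => (k : Int)) n k 0 (List.mem_range.mp hk)
    simp only [Function.comp_apply, this]
  · rw [hvals]; exact PySem.Set.nodup_ofList _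
  · intro v
    rw [hvals, PySem.Set.mem_ofList]
    constructor
    · intro hv
      obtain ⟨k, hk, rfl⟩ := List.mem_map.mp hv
      exact ⟨k, List.mem_range.mp hk, hgL k (List.mem_range.mp hk)⟩
    · rintro ⟨k, hk, hv⟩
      exact List.mem_map.mpr ⟨k, List.mem_range.mpr hk, by rw [← hv, hgL k hk]⟩
  · rw [hvals, pvSet_ofList_of_nodup _ (List.nodup_range.map (fun a b h => by omega))]
    simp
  · intro l x
    by_cases hcase : ∃ k : ℕ, k < n ∧ (k : Int) = l
    · obtain ⟨k, hk, rfl⟩ := hcase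
      rw [PySem.Dict.getD_eq_get?_getD, hget2 k hk]
      simp only [Option.getD_some, List.mem_singleton]
      constructor
      · intro hx
        exact ⟨k, hk, hx, hgL k hk⟩
      · rintro ⟨k', hk', rfl, hlab⟩
        rw [hgL k' hk'] at hlab
        exact hlab
    · have hnc : ((PySem.List.pyRange 0 (n : Int)).foldl (fun d i => d.insert i [i]) PySem.Dict.empty).contains l = false := by
        by_contra habs
        have hmem := (PySem.Dict.contains_iff_mem_keys _ l).mp (by simpa using habs)
        rw [PySem.Dict.keys, hitems2, hL] at hmem
        simp only [List.map_map, List.mem_map, List.mem_range, Function.comp] at hmem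
        obtain ⟨k, hk, hkl⟩ := hmem
        exact hcase ⟨k, hk, hkl⟩
      rw [PySem.Dict.getD_of_not_contains _ _ hnc]
      simp only [List.not_mem_nil, false_iff]
      rintro ⟨k, hk, rfl, hlab⟩
      rw [hgL k hk] at hlab
      exact hcase ⟨k, hk, hlab⟩
-- ===== VERDICT (by name: the statement is the Claim_ definition above) =====
theorem find_last_merge_spec : Claim_equal_find_last_merge := by
  intro conns n_boxes _hdom hpre
  unfold Spec_find_last_merge
  cases conns with
  | nil => simp [find_last_merge, find_last_merge_alt, pvFindLoop, pvAltLoop]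
  | cons c rest =>
    have hc := hpre c (List.mem_cons_self ..)
    have hn : ((n_boxes.toNat : ℤ)) = n_boxes := Int.toNat_of_nonneg (by omega)
    rw [find_last_merge, find_last_merge_alt]
    rw [← hn]
    exact pvLoopEq n_boxes.toNat _ _ _ _ _ _
      (by intro d hd; have := hpre d hd; omega)
      (pvInvInit n_boxes.toNat)
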